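-- pv_equiv track=rewrite | github.com/DJ-Flitzefinger/flitzis-looper | flitzis_looper/core/bpm_control.py | validate_bpm_entry
-- ===== SOURCE A (Python) =====
-- def validate_bpm_entry(new_value):
--     """
--     Validiert Eingaben im BPM-Eingabefeld.
--     Erlaubt nur Zahlen, Punkt und Komma.
--
--     Args:
--         new_value: Der neue Eingabewert
--
--     Returns:
--         True wenn gültig, False sonst
--     """
--     if new_value == "":
--         return True
--     # Erlaube Zahlen, einen Punkt oder ein Komma
--     for char in new_value:
--         if char not in "0123456789.,":
--             return False
--     # Maximal ein Dezimaltrennzeichen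
--     if new_value.count(".") + new_value.count(",") > 1:
--         return False
--     return True
-- ===== SOURCE B (Python) =====
-- import re
--
-- _BPM_RE = re.compile(r"[0-9]*[.,]?[0-9]*")
--
-- def validate_bpm_entry(new_value):
--     return _BPM_RE.fullmatch(new_value) is not None
-- ===== Notes on version B (the rewrite author's own statement) =====
-- stated objective: idiomatic
-- what changed: Replaces the explicit per-character loop plus two .count() passes with a single anchored regex fullmatch (digits, at most one '.' or ',', digits), recognized in one pass by the regex engine.
import Mathlib
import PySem

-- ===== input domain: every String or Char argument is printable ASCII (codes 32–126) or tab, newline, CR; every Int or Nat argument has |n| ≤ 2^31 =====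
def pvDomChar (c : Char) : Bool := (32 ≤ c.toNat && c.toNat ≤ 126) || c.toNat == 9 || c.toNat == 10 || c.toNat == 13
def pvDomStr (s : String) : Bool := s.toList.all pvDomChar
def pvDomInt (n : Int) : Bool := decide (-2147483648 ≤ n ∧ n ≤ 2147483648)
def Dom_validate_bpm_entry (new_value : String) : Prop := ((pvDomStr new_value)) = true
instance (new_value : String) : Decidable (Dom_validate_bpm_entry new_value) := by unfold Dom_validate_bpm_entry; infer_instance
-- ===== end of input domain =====

-- B replaces A's explicit character loop plus two count passes by one anchored
-- regex fullmatch r"[0-9]*[.,]?[0-9]*" (idiomatic; same O(n) cost).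

-- ===== PORT A =====
-- the 'for char in new_value: if char not in "0123456789.,": return False' loop
def vbLoopA : List Char → Bool
  | [] => true
  | c :: cs => if ("0123456789.,".toList).contains c then vbLoopA cs else false

-- new_value.count(".") is ported as List.count '.' — exact for a single-character needle
def validate_bpm_entry (new_value : String) : Bool :=
  if new_value = "" then true
  else if vbLoopA new_value.toList = false then false
  else if new_value.toList.count '.' + new_value.toList.count ',' > 1 then false
  else true

-- ===== PORT B =====
-- hand-port of re.fullmatch(r"[0-9]*[.,]?[0-9]*", s): the pattern's finite
-- automaton, run left to right; 'seen' records whether the optional [.,] was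
-- consumed.  Exact: the regex matches iff every char is a digit except at most
-- one '.' or ','.
def vbDfaB : List Char → Bool → Bool
  | [], _ => true
  | c :: cs, seen =>
    if c.isDigit then vbDfaB cs seen
    else if (c = '.' || c = ',') && !seen then vbDfaB cs true
    else false

def validate_bpm_entry_alt (new_value : String) : Bool :=
  vbDfaB new_value.toList false

-- ===== PRECONDITION & SPEC =====
def Spec_validate_bpm_entry (new_value : String) (out : Bool) : Prop := out = validate_bpm_entry_alt new_value
instance (new_value : String) (out : Bool) : Decidable (Spec_validate_bpm_entry new_value out) := by unfold Spec_validate_bpm_entry; infer_instance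

-- ===== CLAIM (what is proved, stated in full; the proofs are below) =====
def Claim_equal_validate_bpm_entry : Prop := ∀ (new_value : String), Dom_validate_bpm_entry new_value → Spec_validate_bpm_entry new_value (validate_bpm_entry new_value)

-- ===== LEMMAS AND PROOFS =====

theorem chEq (c d : Char) : (c = d) ↔ c.toNat = d.toNat := by
  rw [Char.ext_iff, ← UInt32.toNat_inj]; rfl

theorem chDig (c : Char) : c.isDigit = true ↔ (48 ≤ c.toNat ∧ c.toNat ≤ 57) := by
  simp only [Char.isDigit, Bool.and_eq_true, decide_eq_true_eq, UInt32.le_iff_toNat_le]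
  constructor <;> exact fun h => h

-- the allowed-character test of A, characterised through B's primitives
theorem contains_allowed (c : Char) :
    ("0123456789.,".toList).contains c = (c.isDigit || (c = '.' || c = ',')) := by
  rw [Bool.eq_iff_iff]
  simp only [show "0123456789.,".toList =
      ['0','1','2','3','4','5','6','7','8','9','.',','] from rfl,
    List.contains_eq_mem, List.mem_cons, List.not_mem_nil, or_false,
    Bool.or_eq_true, decide_eq_true_eq, chDig, chEq]
  simp only [show ('0':Char).toNat = 48 from rfl, show ('1':Char).toNat = 49 from rfl,
    show ('2':Char).toNat = 50 from rfl, show ('3':Char).toNat = 51 from rfl,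
    show ('4':Char).toNat = 52 from rfl, show ('5':Char).toNat = 53 from rfl,
    show ('6':Char).toNat = 54 from rfl, show ('7':Char).toNat = 55 from rfl,
    show ('8':Char).toNat = 56 from rfl, show ('9':Char).toNat = 57 from rfl,
    show ('.':Char).toNat = 46 from rfl, show (',':Char).toNat = 44 from rfl]
  omega

theorem loopA_cons (c : Char) (cs : List Char) :
    vbLoopA (c :: cs) = (("0123456789.,".toList).contains c && vbLoopA cs) := by
  by_cases h : ("0123456789.,".toList).contains c = true <;> simp [vbLoopA, h]

theorem dfa_char (l : List Char) (b : Bool) :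
    vbDfaB l b =
      (vbLoopA l && decide (l.count '.' + l.count ',' + (cond b 1 0) ≤ 1)) := by
  induction l generalizing b with
  | nil => cases b <;> simp [vbDfaB, vbLoopA]
  | cons c cs ih =>
    rw [loopA_cons, contains_allowed]
    by_cases hd : c.isDigit = true
    · have hp : c ≠ '.' := by rintro rfl; simp at hd
      have hc : c ≠ ',' := by rintro rfl; simp at hd
      simp [vbDfaB, hd, hp, hc, ih]
    · by_cases hsep : c = '.' ∨ c = ','
      · cases b with
        | false =>
          have h1 : vbDfaB (c :: cs) false = vbDfaB cs true := by
            rcases hsep with rfl | rfl <;> simp [vbDfaB, hd]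
          have h3 : (c :: cs).count '.' + (c :: cs).count ',' =
              cs.count '.' + cs.count ',' + 1 := by
            rcases hsep with rfl | rfl <;> (simp [List.count_cons]; try omega)
          rw [h1, ih]
          have hsepB : (c.isDigit || (c = '.' || c = ',')) = true := by
            rcases hsep with rfl | rfl <;> simp
          rw [hsepB, Bool.true_and]
          congr 1
          rw [Bool.eq_iff_iff]
          simp only [decide_eq_true_eq, h3, cond]
        | true =>
          have h1 : vbDfaB (c :: cs) true = false := by
            rcases hsep with rfl | rfl <;> simp [vbDfaB, hd]
          have h3 : ¬ ((c :: cs).count '.' + (c :: cs).count ',' + 1 ≤ 1) := by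
            rcases hsep with rfl | rfl <;> (simp [List.count_cons]; try omega)
          simp [h1, h3]
      · rw [not_or] at hsep
        have h1 : vbDfaB (c :: cs) b = false := by
          simp [vbDfaB, hd, hsep.1, hsep.2]
        simp [h1, hd, hsep.1, hsep.2]

-- ===== VERDICT (by name: the statement is the Claim_ definition above) =====
theorem validate_bpm_entry_spec : Claim_equal_validate_bpm_entry := by
  intro s _
  unfold Spec_validate_bpm_entry validate_bpm_entry validate_bpm_entry_alt
  rw [dfa_char]
  by_cases he : s = ""
  · subst he; decide
  · simp only [he, if_false]
    rcases hA : vbLoopA s.toList with _ | _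
    · simp
    · simp only [Bool.true_and]
      by_cases hcnt : s.toList.count '.' + s.toList.count ',' > 1 <;>
        simp [hcnt] <;> omega
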